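-- pv_equiv track=rewrite | github.com/neosizzle/gomoku | backend/example/static_eval_example/main.py | generate_column_indices
-- ===== SOURCE A (Python) =====
-- def generate_column_indices(board_size):
--     column_indices = []
--     for i in range(board_size):
--         curr_col = []
--         for j in range(board_size):
--             curr_col.append(i + (board_size * j))
--         column_indices.append(curr_col)
--     return column_indices
-- ===== SOURCE B (Python) =====
-- def generate_column_indices(board_size):
--     rows = [[i * board_size + j for j in range(board_size)] for i in range(board_size)]
--     return [list(col) for col in zip(*rows)]
-- ===== Notes on version B (the rewrite author's own statement) =====
-- stated objective: alternative
-- what changed: B builds the row-major index table rows[i][j] = i*n + j in a first pass and then transposes it with zip(*rows), instead of A's direct emission of each column element as i + n*j in nested loops.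
import Mathlib
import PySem

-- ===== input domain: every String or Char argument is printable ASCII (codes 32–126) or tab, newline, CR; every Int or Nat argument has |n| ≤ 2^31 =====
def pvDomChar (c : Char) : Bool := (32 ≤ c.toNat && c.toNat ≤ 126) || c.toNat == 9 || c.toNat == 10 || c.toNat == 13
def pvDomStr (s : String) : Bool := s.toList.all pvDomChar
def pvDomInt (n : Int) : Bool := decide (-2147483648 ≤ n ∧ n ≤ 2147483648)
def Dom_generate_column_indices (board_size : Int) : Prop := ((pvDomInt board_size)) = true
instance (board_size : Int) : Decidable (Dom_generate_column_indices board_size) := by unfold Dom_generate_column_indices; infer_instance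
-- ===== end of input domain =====

-- B builds the row-major index table first and then transposes it (zip(*rows)); an
-- alternative staged-pass decomposition of A's direct nested column emission.


-- ===== PORT A =====
def generate_column_indices (board_size : Int) : List (List Int) :=
  (PySem.List.pyRange 0 board_size 1).foldl
    (fun column_indices i =>
      column_indices ++
        [(PySem.List.pyRange 0 board_size 1).foldl
          (fun curr_col j => curr_col ++ [i + board_size * j]) []])
    []

-- ===== PORT B =====
-- zip(*rows): repeatedly take the head of every row until some row (or the row list) runs out;
-- exact port of Python's zip over the unpacked rows.
def pyZipStar (rows : List (List Int)) : List (List Int) :=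
  if h : rows = [] ∨ rows.any (fun r => r.isEmpty) then []
  else (rows.map (fun r => r.headI)) :: pyZipStar (rows.map (fun r => r.tail))
termination_by rows.headI.length
decreasing_by
  rw [not_or] at h
  obtain ⟨hne, hall⟩ := h
  cases rows with
  | nil => exact absurd rfl hne
  | cons r rest =>
    simp only [List.any_cons] at hall
    cases r with
    | nil => simp [List.isEmpty] at hall
    | cons a t => simp

def generate_column_indices_alt (board_size : Int) : List (List Int) :=
  let rows := (PySem.List.pyRange 0 board_size 1).map
    (fun i => (PySem.List.pyRange 0 board_size 1).map (fun j => i * board_size + j))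
  pyZipStar rows

-- ===== PRECONDITION & SPEC =====
def Spec_generate_column_indices (board_size : Int) (out : List (List Int)) : Prop := out = generate_column_indices_alt board_size
instance (board_size : Int) (out : List (List Int)) : Decidable (Spec_generate_column_indices board_size out) := by unfold Spec_generate_column_indices; infer_instance

-- ===== CLAIM (what is proved, stated in full; the proofs are below) =====
def Claim_equal_generate_column_indices : Prop := ∀ (board_size : Int), Dom_generate_column_indices board_size → Spec_generate_column_indices board_size (generate_column_indices board_size)

-- ===== LEMMAS AND PROOFS =====

theorem foldl_snoc_map (L : List Int) (f : Int → List Int) (init : List (List Int)) :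
    L.foldl (fun acc x => acc ++ [f x]) init = init ++ L.map f := by
  induction L generalizing init with
  | nil => simp
  | cons a t ih => simp [List.foldl, ih]

theorem foldl_snoc_map' (L : List Int) (f : Int → Int) (init : List Int) :
    L.foldl (fun acc x => acc ++ [f x]) init = init ++ L.map f := by
  induction L generalizing init with
  | nil => simp
  | cons a t ih => simp [List.foldl, ih]

theorem pyZipStar_rect (L : List Int) (hL : L ≠ []) (f : Int → Int → Int) :
    ∀ (M : List Int),
      pyZipStar (L.map (fun i => M.map (fun j => f i j)))
        = M.map (fun j => L.map (fun i => f i j)) := by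
  intro M
  induction M with
  | nil =>
    rw [pyZipStar]
    rw [dif_pos]
    · simp
    · right
      cases L with
      | nil => exact absurd rfl hL
      | cons a t => simp
  | cons j M' ih =>
    rw [pyZipStar]
    rw [dif_neg]
    · simp only [List.map_map, Function.comp_def, List.map_cons, List.headI_cons, List.tail_cons]
      rw [ih]
    · rw [not_or]
      constructor
      · cases L with
        | nil => exact absurd rfl hL
        | cons a t => simp
      · simp

theorem generate_column_indices_spec : Claim_equal_generate_column_indices := by
  intro n _
  unfold Spec_generate_column_indices generate_column_indices generate_column_indices_alt
  rw [foldl_snoc_map]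
  simp only [List.nil_append]
  by_cases hL : PySem.List.pyRange 0 n 1 = []
  · rw [hL]
    simp [pyZipStar]
  · rw [pyZipStar_rect _ hL (fun i j => i * n + j)]
    apply List.map_congr_left
    intro i _
    rw [foldl_snoc_map']
    simp only [List.nil_append]
    apply List.map_congr_left
    intro j _
    ring
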